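-- pv_equiv track=rewrite | github.com/Chandru03/re-pack | multipack_poc/core/solver_box_to_pallet.py | _generate_2d_candidates_with_orientations
-- ===== SOURCE A (Python) =====
-- from typing import Dict, List, Tuple
--
-- def _generate_axis_positions_2d(max_length: int, sizes: List[int]) -> List[int]:
--     """
--     Compute all reachable coordinate starts by combining item sizes up to the container limit.
--     This allows boxes to be placed at any position that can be reached by multiples of box dimensions,
--     enabling more flexible and efficient packing.
--     """
--     sizes = [size for size in sizes if size > 0]
--     if not sizes:
--         return [0]
--
--     reachable = {0}
--     queue = [0]
--     while queue:
--         current = queue.pop()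
--         for size in sizes:
--             new_value = current + size
--             if new_value <= max_length and new_value not in reachable:
--                 reachable.add(new_value)
--                 queue.append(new_value)
--
--     return sorted(reachable)
--
-- def _generate_2d_candidates_with_orientations(
--     pallet_length: int,
--     pallet_width: int,
--     orientations: List[Tuple[int, int, int]],
-- ) -> List[Tuple[int, int, Tuple[int, int, int]]]:
--     """
--     Generate 2D candidate placements for all orientations.
--     Returns list of (x, y, orientation) tuples.
--     """
--     candidates: List[Tuple[int, int, Tuple[int, int, int]]] = []
--
--     # Generate reachable positions for all orientations
--     all_lengths = [ori[0] for ori in orientations]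
--     all_widths = [ori[1] for ori in orientations]
--
--     x_positions = _generate_axis_positions_2d(pallet_length, all_lengths)
--     y_positions = _generate_axis_positions_2d(pallet_width, all_widths)
--
--     # Generate candidates for each orientation
--     for orientation in orientations:
--         length, width, height = orientation
--         feasible_x = [x for x in x_positions if x + length <= pallet_length]
--         feasible_y = [y for y in y_positions if y + width <= pallet_width]
--
--         for x in feasible_x:
--             for y in feasible_y:
--                 candidates.append((x, y, orientation))
--
--     return candidates
-- ===== SOURCE B (Python) =====
-- from typing import List, Tuple
--
-- def _generate_axis_positions_2d(max_length: int, sizes: List[int]) -> List[int]: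
--     sizes = [size for size in sizes if size > 0]
--     if not sizes or max_length < 0:
--         return [0]
--     reach = [False] * (max_length + 1)
--     reach[0] = True
--     for v in range(1, max_length + 1):
--         reach[v] = any(s <= v and reach[v - s] for s in sizes)
--     return [v for v in range(max_length + 1) if reach[v]]
--
-- def _generate_2d_candidates_with_orientations(
--     pallet_length: int,
--     pallet_width: int,
--     orientations: List[Tuple[int, int, int]],
-- ) -> List[Tuple[int, int, Tuple[int, int, int]]]:
--     x_positions = _generate_axis_positions_2d(pallet_length, [ori[0] for ori in orientations])
--     y_positions = _generate_axis_positions_2d(pallet_width, [ori[1] for ori in orientations])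
--     return [
--         (x, y, ori)
--         for ori in orientations
--         for x in x_positions if x + ori[0] <= pallet_length
--         for y in y_positions if y + ori[1] <= pallet_width
--     ]
-- ===== Notes on version B (the rewrite author's own statement) =====
-- stated objective: alternative
-- what changed: The reachable-positions helper is re-implemented as a bottom-up boolean dynamic program indexed by coordinate (reach[v] = any s<=v with reach[v-s]) instead of the set+worklist graph exploration, and the entry's append loops become one comprehension.
import Mathlib
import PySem

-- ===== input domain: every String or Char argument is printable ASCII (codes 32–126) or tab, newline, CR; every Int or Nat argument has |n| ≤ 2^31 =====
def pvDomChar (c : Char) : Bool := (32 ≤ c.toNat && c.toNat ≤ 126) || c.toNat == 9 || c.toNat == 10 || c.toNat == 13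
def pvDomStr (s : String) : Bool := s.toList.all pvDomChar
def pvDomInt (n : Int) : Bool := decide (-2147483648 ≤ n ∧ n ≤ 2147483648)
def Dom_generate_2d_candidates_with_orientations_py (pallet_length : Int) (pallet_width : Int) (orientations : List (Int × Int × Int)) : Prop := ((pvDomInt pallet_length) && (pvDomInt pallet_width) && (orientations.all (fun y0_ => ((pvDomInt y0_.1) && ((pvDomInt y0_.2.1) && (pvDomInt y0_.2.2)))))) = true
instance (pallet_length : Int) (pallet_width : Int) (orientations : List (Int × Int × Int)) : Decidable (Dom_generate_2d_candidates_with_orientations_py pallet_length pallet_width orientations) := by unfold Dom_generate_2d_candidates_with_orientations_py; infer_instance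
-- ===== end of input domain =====

-- B replaces A's set+worklist reachability exploration by a bottom-up boolean DP indexed by
-- coordinate and turns the append loops into one comprehension (objective: alternative, same cost).

-- ===== PORT A =====
-- Inner `for size in sizes:` body of A's while-loop (state = (reachable, queue)).
def pvBfsStep (max_length : Int) (current : Int) (sizes : List Int)
    (st : PySem.Set Int × List Int) : PySem.Set Int × List Int :=
  sizes.foldl (fun st size =>
    if current + size ≤ max_length ∧ (current + size) ∉ st.1 then
      (PySem.Set.add st.1 (current + size), st.2 ++ [current + size])
    else st) st

-- Shape of one step: it appends the same fresh block to both components (used for termination).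
lemma pvBfsStep_shape (m c : Int) (sizes : List Int) :
    ∀ (r : PySem.Set Int) (q : List Int), r.Nodup →
    ∃ new : List Int, pvBfsStep m c sizes (r, q) = (r ++ new, q ++ new) ∧
      (r ++ new).Nodup ∧ (∀ v ∈ new, v ≤ m ∧ ∃ s ∈ sizes, v = c + s) := by
  induction sizes with
  | nil => exact fun r q hnd => ⟨[], by simp [pvBfsStep], by simpa using hnd, by simp⟩
  | cons s rest ih =>
    intro r q hnd
    by_cases hg : c + s ≤ m ∧ (c + s) ∉ r
    · have hadd : PySem.Set.add r (c + s) = r ++ [c + s] := by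
        simp [PySem.Set.add, PySem.Set.contains, hg.2]
      have hnd' : (r ++ [c + s]).Nodup :=
        List.nodup_append.mpr ⟨hnd, List.nodup_singleton _,
          fun a ha b hb heq => by subst heq; exact hg.2 ((List.mem_singleton.mp hb) ▸ ha)⟩
      obtain ⟨new', h1, h2, h3⟩ := ih (r ++ [c + s]) (q ++ [c + s]) hnd'
      refine ⟨(c + s) :: new', ?_, ?_, ?_⟩
      · simp only [pvBfsStep, List.foldl_cons] at h1 ⊢
        rw [if_pos hg, hadd]
        simpa [List.append_assoc] using h1
      · simpa [List.append_assoc] using h2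
      · intro v hv
        rcases List.mem_cons.mp hv with rfl | hv
        · exact ⟨hg.1, s, List.mem_cons_self .., rfl⟩
        · obtain ⟨hvm, s', hs', hveq⟩ := h3 v hv
          exact ⟨hvm, s', List.mem_cons_of_mem _ hs', hveq⟩
    · obtain ⟨new', h1, h2, h3⟩ := ih r q hnd
      refine ⟨new', ?_, h2, ?_⟩
      · simp only [pvBfsStep, List.foldl_cons] at h1 ⊢
        rw [if_neg hg]
        exact h1
      · intro v hv
        obtain ⟨hvm, s', hs', hveq⟩ := h3 v hv
        exact ⟨hvm, s', List.mem_cons_of_mem _ hs', hveq⟩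

-- Termination invariant of A's while-loop: reachable is duplicate-free, its elements lie in
-- {0} ∪ (0, max_length], and the queue holds reachable elements.
def pvBfsInv (m : Int) (r : PySem.Set Int) (q : List Int) : Prop :=
  r.Nodup ∧ (∀ v ∈ r, 0 ≤ v ∧ (v = 0 ∨ v ≤ m)) ∧ (∀ v ∈ q, v ∈ r)

lemma pvBfsInv_step (m : Int) (sizes : List Int) (hs : ∀ s ∈ sizes, 0 < s)
    (r : PySem.Set Int) (q : List Int) (hq : q ≠ []) (h : pvBfsInv m r q) :
    pvBfsInv m (pvBfsStep m (q.getLast hq) sizes (r, q.dropLast)).1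
      (pvBfsStep m (q.getLast hq) sizes (r, q.dropLast)).2 := by
  obtain ⟨hnd, hbd, hqr⟩ := h
  obtain ⟨new, heq, hnd', hnew⟩ := pvBfsStep_shape m (q.getLast hq) sizes r q.dropLast hnd
  have hc : q.getLast hq ∈ r := hqr _ (List.getLast_mem hq)
  rw [heq]
  refine ⟨hnd', ?_, ?_⟩
  · intro v hv
    rcases List.mem_append.mp hv with hv | hv
    · exact hbd v hv
    · obtain ⟨hvm, s, hsmem, rfl⟩ := hnew v hv
      have h1 := hs s hsmem
      have h2 := (hbd _ hc).1
      exact ⟨by omega, Or.inr hvm⟩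
  · intro v hv
    rcases List.mem_append.mp hv with hv | hv
    · exact List.mem_append_left _ (hqr v (List.dropLast_subset q hv))
    · exact List.mem_append_right _ hv

lemma pvLenBound (m : Int) (l : List Int) (hnd : l.Nodup)
    (hb : ∀ v ∈ l, 0 ≤ v ∧ (v = 0 ∨ v ≤ m)) : l.length ≤ 1 + m.toNat := by
  classical
  have h1 : l.toFinset ⊆ insert (0 : Int) (Finset.Icc 1 m) := by
    intro v hv
    simp only [List.mem_toFinset] at hv
    obtain ⟨h0, h2⟩ := hb v hv
    rcases h2 with rfl | h2
    · simp
    · by_cases hv0 : v = 0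
      · simp [hv0]
      · exact Finset.mem_insert_of_mem (Finset.mem_Icc.mpr ⟨by omega, h2⟩)
  have h2 := Finset.card_le_card h1
  have h3 := Finset.card_insert_le (0 : Int) (Finset.Icc 1 m)
  have h4 : (Finset.Icc (1 : Int) m).card = m.toNat := by
    rw [Int.card_Icc]; simp
  have h5 : l.toFinset.card = l.length := List.toFinset_card_of_nodup hnd
  omega

lemma pvBfsStep_measure (m : Int) (sizes : List Int) (hs : ∀ s ∈ sizes, 0 < s)
    (r : PySem.Set Int) (q : List Int) (hq : q ≠ []) (h : pvBfsInv m r q) :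
    2 * (1 + m.toNat - (pvBfsStep m (q.getLast hq) sizes (r, q.dropLast)).1.length) +
      (pvBfsStep m (q.getLast hq) sizes (r, q.dropLast)).2.length <
    2 * (1 + m.toNat - r.length) + q.length := by
  obtain ⟨new, heq, hnd', hnew⟩ := pvBfsStep_shape m (q.getLast hq) sizes r q.dropLast h.1
  have h2 := pvBfsInv_step m sizes hs r q hq h
  rw [heq] at h2
  have hlen : (r ++ new).length ≤ 1 + m.toNat := pvLenBound m (r ++ new) h2.1 h2.2.1
  rw [heq]
  have hq1 : 1 ≤ q.length := List.length_pos_of_ne_nil hq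
  simp only [List.length_append, List.length_dropLast] at hlen ⊢
  omega

-- A's `while queue:` loop (queue.pop() pops the LAST element).
def pvBfsLoop (m : Int) (sizes : List Int) (hs : ∀ s ∈ sizes, 0 < s)
    (r : PySem.Set Int) (q : List Int) (h : pvBfsInv m r q) : PySem.Set Int :=
  if hq : q = [] then r
  else
    pvBfsLoop m sizes hs
      (pvBfsStep m (q.getLast hq) sizes (r, q.dropLast)).1
      (pvBfsStep m (q.getLast hq) sizes (r, q.dropLast)).2
      (pvBfsInv_step m sizes hs r q hq h)
termination_by 2 * (1 + m.toNat - r.length) + q.length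
decreasing_by exact pvBfsStep_measure m sizes hs r q hq h

def pvAxisPositionsA (max_length : Int) (sizes : List Int) : List Int :=
  let sizes := sizes.filter (fun s => decide (0 < s))
  if hsz : sizes = [] then [0]
  else
    PySem.List.sorted
      (pvBfsLoop max_length sizes
        (fun s hsm => of_decide_eq_true (List.mem_filter.mp hsm).2)
        (PySem.Set.ofList [0]) [0]
        (by refine ⟨by decide, ?_, ?_⟩ <;> intro v hv <;> simp_all [PySem.Set.ofList, PySem.Set.add, PySem.Set.contains]))
      (fun x => x)

def generate_2d_candidates_with_orientations_py (pallet_length : Int) (pallet_width : Int) (orientations : List (Int × Int × Int)) : List (Int × Int × (Int × Int × Int)) :=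
  let all_lengths := orientations.map (fun ori => ori.1)
  let all_widths := orientations.map (fun ori => ori.2.1)
  let x_positions := pvAxisPositionsA pallet_length all_lengths
  let y_positions := pvAxisPositionsA pallet_width all_widths
  orientations.foldl (fun cands ori =>
    let feasible_x := x_positions.filter (fun x => decide (x + ori.1 ≤ pallet_length))
    let feasible_y := y_positions.filter (fun y => decide (y + ori.2.1 ≤ pallet_width))
    feasible_x.foldl (fun c x =>
      feasible_y.foldl (fun c y => c ++ [(x, y, ori)]) c) cands) []

-- ===== PORT B =====
-- B's helper: bottom-up DP array reach[0..max_length], reach[v] = any(s<=v and reach[v-s]).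
def pvAxisPositionsB (max_length : Int) (sizes : List Int) : List Int :=
  let sizes := sizes.filter (fun s => decide (0 < s))
  if sizes = [] ∨ max_length < 0 then [0]
  else
    let n := max_length.toNat
    let init := (List.replicate (n + 1) false).set 0 true
    let reach := (List.range' 1 n).foldl
      (fun arr v => arr.set v
        (sizes.any (fun s => decide (s ≤ (v : Int)) && arr.getD ((v : Int) - s).toNat false))) init
    ((List.range (n + 1)).filter (fun v => reach.getD v false)).map (fun v => Int.ofNat v)

def generate_2d_candidates_with_orientations_py_alt (pallet_length : Int) (pallet_width : Int) (orientations : List (Int × Int × Int)) : List (Int × Int × (Int × Int × Int)) :=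
  let x_positions := pvAxisPositionsB pallet_length (orientations.map (fun ori => ori.1))
  let y_positions := pvAxisPositionsB pallet_width (orientations.map (fun ori => ori.2.1))
  orientations.flatMap (fun ori =>
    (x_positions.filter (fun x => decide (x + ori.1 ≤ pallet_length))).flatMap (fun x =>
      (y_positions.filter (fun y => decide (y + ori.2.1 ≤ pallet_width))).map (fun y => (x, y, ori))))

-- ===== PRECONDITION & SPEC =====
def Spec_generate_2d_candidates_with_orientations_py (pallet_length : Int) (pallet_width : Int) (orientations : List (Int × Int × Int)) (out : List (Int × Int × (Int × Int × Int))) : Prop := out = generate_2d_candidates_with_orientations_py_alt pallet_length pallet_width orientations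
instance (pallet_length : Int) (pallet_width : Int) (orientations : List (Int × Int × Int)) (out : List (Int × Int × (Int × Int × Int))) : Decidable (Spec_generate_2d_candidates_with_orientations_py pallet_length pallet_width orientations out) := by unfold Spec_generate_2d_candidates_with_orientations_py; infer_instance

-- ===== CLAIM (what is proved, stated in full; the proofs are below) =====
def Claim_equal_generate_2d_candidates_with_orientations_py : Prop := ∀ (pallet_length : Int) (pallet_width : Int) (orientations : List (Int × Int × Int)), Dom_generate_2d_candidates_with_orientations_py pallet_length pallet_width orientations → Spec_generate_2d_candidates_with_orientations_py pallet_length pallet_width orientations (generate_2d_candidates_with_orientations_py pallet_length pallet_width orientations)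

-- ===== LEMMAS AND PROOFS =====

-- Values reachable from 0 by adding sizes while staying ≤ m: the common specification of
-- A's worklist closure and B's DP table.
inductive pvReach (m : Int) (sizes : List Int) : Int → Prop where
  | zero : pvReach m sizes 0
  | step {v s : Int} : pvReach m sizes v → s ∈ sizes → v + s ≤ m → pvReach m sizes (v + s)

lemma pvReach_nonneg (m : Int) (sizes : List Int) (hs : ∀ s ∈ sizes, 0 < s) {v : Int}
    (h : pvReach m sizes v) : 0 ≤ v := by
  induction h with
  | zero => omega
  | step _ hmem _ ih => have := hs _ hmem; omega

lemma pvReach_bound (m : Int) (sizes : List Int) {v : Int} (h : pvReach m sizes v) :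
    v = 0 ∨ v ≤ m := by
  cases h with
  | zero => left; rfl
  | step _ _ hle => right; exact hle

lemma pvReach_iff_pos (m : Int) (sizes : List Int) (hs : ∀ s ∈ sizes, 0 < s) {v : Int}
    (hv : 0 < v) : pvReach m sizes v ↔ v ≤ m ∧ ∃ s ∈ sizes, s ≤ v ∧ pvReach m sizes (v - s) := by
  constructor
  · intro h
    cases h with
    | zero => omega
    | step hw hsmem hle =>
      rename_i w s
      have hw0 : 0 ≤ w := pvReach_nonneg m sizes hs hw
      have hs0 : 0 < s := hs s hsmem
      refine ⟨hle, s, hsmem, by omega, ?_⟩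
      have : w + s - s = w := by ring
      rw [this]
      exact hw
  · rintro ⟨hvm, s, hsmem, hsle, hr⟩
    have h2 := pvReach.step hr hsmem (show v - s + s ≤ m by omega)
    have h3 : v - s + s = v := by ring
    rwa [h3] at h2

lemma pvBfsStep_mono (m c : Int) (sizes : List Int) :
    ∀ (r : PySem.Set Int) (q : List Int) (v : Int), v ∈ r →
      v ∈ (pvBfsStep m c sizes (r, q)).1 := by
  induction sizes with
  | nil => intro r q v hv; simpa [pvBfsStep] using hv
  | cons s rest ih =>
    intro r q v hv
    simp only [pvBfsStep, List.foldl_cons] at ih ⊢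
    by_cases hg : c + s ≤ m ∧ (c + s) ∉ r
    · rw [if_pos hg]
      exact ih _ _ v ((PySem.Set.mem_add r (c + s) v).mpr (Or.inl hv))
    · rw [if_neg hg]
      exact ih _ _ v hv

lemma pvBfsStep_expand (m c : Int) (sizes : List Int) :
    ∀ (r : PySem.Set Int) (q : List Int) (s : Int), s ∈ sizes → c + s ≤ m →
      c + s ∈ (pvBfsStep m c sizes (r, q)).1 := by
  induction sizes with
  | nil => intro r q s hsm _; simp at hsm
  | cons s0 rest ih =>
    intro r q s hsm hle
    simp only [pvBfsStep, List.foldl_cons] at ih ⊢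
    rcases List.mem_cons.mp hsm with rfl | hsm
    · have hmem : c + s ∈ (if c + s ≤ m ∧ (c + s) ∉ r then
          (PySem.Set.add r (c + s), q ++ [c + s]) else (r, q)).1 := by
        by_cases hg : c + s ≤ m ∧ (c + s) ∉ r
        · rw [if_pos hg]
          exact (PySem.Set.mem_add r (c + s) (c + s)).mpr (Or.inr rfl)
        · rw [if_neg hg]
          by_cases hmem2 : (c + s) ∈ r
          · exact hmem2
          · exact absurd ⟨hle, hmem2⟩ hg
      by_cases hg : c + s ≤ m ∧ (c + s) ∉ r
      · rw [if_pos hg] at hmem ⊢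
        exact pvBfsStep_mono m c rest _ _ _ hmem
      · rw [if_neg hg] at hmem ⊢
        exact pvBfsStep_mono m c rest _ _ _ hmem
    · by_cases hg : c + s0 ≤ m ∧ (c + s0) ∉ r
      · rw [if_pos hg]; exact ih _ _ s hsm hle
      · rw [if_neg hg]; exact ih _ _ s hsm hle

-- Main property of A's loop: the final set is duplicate-free, contains everything it started
-- with, consists of pvReach-values only, and is closed under one more step.
lemma pvBfsLoop_props (m : Int) (sizes : List Int) (hs : ∀ s ∈ sizes, 0 < s) :
    ∀ (r : PySem.Set Int) (q : List Int) (h : pvBfsInv m r q),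
    (∀ v ∈ r, pvReach m sizes v) → q.Nodup →
    (∀ v ∈ r, v ∉ q → ∀ s ∈ sizes, v + s ≤ m → v + s ∈ r) →
    (pvBfsLoop m sizes hs r q h).Nodup ∧
    (∀ v ∈ r, v ∈ pvBfsLoop m sizes hs r q h) ∧
    (∀ v ∈ pvBfsLoop m sizes hs r q h, pvReach m sizes v) ∧
    (∀ v ∈ pvBfsLoop m sizes hs r q h, ∀ s ∈ sizes, v + s ≤ m →
      v + s ∈ pvBfsLoop m sizes hs r q h) := by
  intro r q h
  induction r, q, h using pvBfsLoop.induct m sizes hs with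
  | case1 r h =>
    intro hsound hqnd hexp
    rw [pvBfsLoop]
    exact ⟨h.1, fun v hv => hv, hsound,
      fun v hv s hsm hle => hexp v hv (List.not_mem_nil) s hsm hle⟩
  | case2 r q h hq ih =>
    intro hsound hqnd hexp
    obtain ⟨new, heq, hnd2, hnew⟩ := pvBfsStep_shape m (q.getLast hq) sizes r q.dropLast h.1
    have hc : q.getLast hq ∈ r := h.2.2 _ (List.getLast_mem hq)
    have hqsplit : q.dropLast ++ [q.getLast hq] = q := List.dropLast_append_getLast hq
    have hnddis := List.nodup_append.mp hnd2
    -- the three loop invariants for the stepped state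
    have hsound2 : ∀ v ∈ (pvBfsStep m (q.getLast hq) sizes (r, q.dropLast)).1,
        pvReach m sizes v := by
      rw [heq]
      intro v hv
      rcases List.mem_append.mp hv with hv | hv
      · exact hsound v hv
      · obtain ⟨hvm, s, hsmem, rfl⟩ := hnew v hv
        exact pvReach.step (hsound _ hc) hsmem hvm
    have hqnd2 : (pvBfsStep m (q.getLast hq) sizes (r, q.dropLast)).2.Nodup := by
      rw [heq]
      refine List.nodup_append.mpr ⟨hqnd.sublist (List.dropLast_sublist q), hnddis.2.1, ?_⟩
      intro v hv
      exact hnddis.2.2 v (h.2.2 v (List.dropLast_subset q hv))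
    have hexp2 : ∀ v ∈ (pvBfsStep m (q.getLast hq) sizes (r, q.dropLast)).1,
        v ∉ (pvBfsStep m (q.getLast hq) sizes (r, q.dropLast)).2 →
        ∀ s ∈ sizes, v + s ≤ m → v + s ∈ (pvBfsStep m (q.getLast hq) sizes (r, q.dropLast)).1 := by
      intro v hv hvq s hsm hle
      rw [heq] at hv hvq
      rcases List.mem_append.mp hv with hv | hv
      · by_cases hvc : v = q.getLast hq
        · rw [hvc] at hle ⊢
          exact pvBfsStep_expand m (q.getLast hq) sizes r q.dropLast s hsm hle
        · have hvq' : v ∉ q := by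
            rw [← hqsplit]
            intro hmem
            rcases List.mem_append.mp hmem with h1 | h1
            · exact hvq (List.mem_append_left _ h1)
            · exact hvc (by simpa using h1)
          rw [heq]
          exact List.mem_append_left _ (hexp v hv hvq' s hsm hle)
      · exact absurd (List.mem_append_right _ hv) hvq
    obtain ⟨hN, hSub, hSnd, hCl⟩ := ih hsound2 hqnd2 hexp2
    rw [pvBfsLoop]
    simp only [dif_neg hq]
    refine ⟨hN, ?_, hSnd, hCl⟩
    intro v hv
    refine hSub v ?_
    rw [heq]
    exact List.mem_append_left _ hv


-- Membership characterisation of A's final set.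
lemma pvBfsLoop_mem (m : Int) (sizes : List Int) (hs : ∀ s ∈ sizes, 0 < s)
    (h : pvBfsInv m (PySem.Set.ofList [0]) [0]) :
    (pvBfsLoop m sizes hs (PySem.Set.ofList [0]) [0] h).Nodup ∧
    ∀ v : Int, v ∈ pvBfsLoop m sizes hs (PySem.Set.ofList [0]) [0] h ↔ pvReach m sizes v := by
  have h00 : (PySem.Set.ofList [(0 : Int)]) = [0] := by decide
  obtain ⟨hN, hSub, hSnd, hCl⟩ := pvBfsLoop_props m sizes hs (PySem.Set.ofList [0]) [0] h
    (by
      rw [h00]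
      intro v hv
      rw [List.mem_singleton] at hv
      subst hv
      exact pvReach.zero)
    (List.nodup_singleton _)
    (by
      rw [h00]
      intro v hv hvq
      exact absurd hv hvq)
  refine ⟨hN, fun v => ⟨hSnd v, ?_⟩⟩
  intro hr
  induction hr with
  | zero =>
    refine hSub 0 ?_
    rw [h00]
    exact List.mem_singleton.mpr rfl
  | step hw hsm hle ihw => exact hCl _ ihw _ hsm hle

-- DP table correctness: after processing 1..j, entry i holds decide (pvReach i) for i ≤ j.
lemma pvDPInv (m : Int) (hm : 0 ≤ m) (sizes : List Int) (hs : ∀ s ∈ sizes, 0 < s) :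
    ∀ j : Nat, j ≤ m.toNat →
      (((List.range' 1 j).foldl
          (fun arr v => arr.set v
            (sizes.any (fun s => decide (s ≤ (v : Int)) && arr.getD ((v : Int) - s).toNat false)))
          ((List.replicate (m.toNat + 1) false).set 0 true)).length = m.toNat + 1) ∧
      (∀ i : Nat, i ≤ m.toNat →
        (i ≤ j →
          (((List.range' 1 j).foldl
            (fun arr v => arr.set v
              (sizes.any (fun s => decide (s ≤ (v : Int)) && arr.getD ((v : Int) - s).toNat false)))
            ((List.replicate (m.toNat + 1) false).set 0 true)).getD i false = true ↔
            pvReach m sizes (i : Int))) ∧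
        (j < i →
          ((List.range' 1 j).foldl
            (fun arr v => arr.set v
              (sizes.any (fun s => decide (s ≤ (v : Int)) && arr.getD ((v : Int) - s).toNat false)))
            ((List.replicate (m.toNat + 1) false).set 0 true)).getD i false = false)) := by
  intro j
  induction j with
  | zero =>
    intro _
    refine ⟨by simp, ?_⟩
    intro i _
    simp only [List.range'_zero, List.foldl_nil]
    constructor
    · intro hij
      have hi0 : i = 0 := Nat.le_zero.mp hij
      subst hi0
      constructor
      · intro _
        exact pvReach.zero
      · intro _
        simp [List.replicate_succ]
    · intro hij
      rcases Nat.exists_eq_add_of_lt hij with ⟨k, rfl⟩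
      simp [List.replicate_succ, List.getD]
  | succ j ihj =>
    intro hj1
    have hj : j ≤ m.toNat := Nat.le_of_succ_le hj1
    obtain ⟨ihlen, ihget⟩ := ihj hj
    rw [List.range'_concat]
    simp only [List.foldl_append, List.foldl_cons, List.foldl_nil]
    have hx : 1 + 1 * j = j + 1 := by omega
    rw [hx]
    -- A := the table after processing 1..j
    set A := (List.range' 1 j).foldl
      (fun arr v => arr.set v
        (sizes.any (fun s => decide (s ≤ (v : Int)) && arr.getD ((v : Int) - s).toNat false)))
      ((List.replicate (m.toNat + 1) false).set 0 true) with hA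
    have harrget : ∀ idx : Nat, idx ≤ j → (A.getD idx false = true ↔ pvReach m sizes (idx : Int)) :=
      fun idx h2 => (ihget idx (le_trans h2 hj)).1 h2
    have hvpos : (0 : Int) < ((j + 1 : Nat) : Int) := by omega
    have hvle : ((j + 1 : Nat) : Int) ≤ m := by omega
    have hbval :
        (sizes.any (fun s => decide (s ≤ ((j + 1 : Nat) : Int)) &&
          A.getD (((j + 1 : Nat) : Int) - s).toNat false) = true) ↔
        pvReach m sizes ((j + 1 : Nat) : Int) := by
      rw [List.any_eq_true, pvReach_iff_pos m sizes hs hvpos]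
      constructor
      · rintro ⟨s, hsm, hcond⟩
        rw [Bool.and_eq_true, decide_eq_true_iff] at hcond
        obtain ⟨h1, h2⟩ := hcond
        have hs0 := hs s hsm
        have hidx : (((((j + 1 : Nat) : Int) - s).toNat : Nat) : Int) = ((j + 1 : Nat) : Int) - s := by omega
        have hidxle : (((j + 1 : Nat) : Int) - s).toNat ≤ j := by omega
        refine ⟨hvle, s, hsm, h1, ?_⟩
        have h3 := (harrget _ hidxle).mp h2
        rwa [hidx] at h3
      · rintro ⟨_, s, hsm, hsle, hr⟩
        refine ⟨s, hsm, ?_⟩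
        rw [Bool.and_eq_true, decide_eq_true_iff]
        refine ⟨hsle, ?_⟩
        have hs0 := hs s hsm
        have hidx : (((((j + 1 : Nat) : Int) - s).toNat : Nat) : Int) = ((j + 1 : Nat) : Int) - s := by omega
        have hidxle : (((j + 1 : Nat) : Int) - s).toNat ≤ j := by omega
        exact (harrget _ hidxle).mpr (by rw [hidx]; exact hr)
    have hjlen : j + 1 < A.length := by omega
    refine ⟨by simp [ihlen], ?_⟩
    intro i hi
    constructor
    · intro hij
      by_cases hie : i = j + 1
      · subst hie
        rw [show (A.set (j + 1)
            (sizes.any (fun s => decide (s ≤ ((j + 1 : Nat) : Int)) &&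
              A.getD (((j + 1 : Nat) : Int) - s).toNat false))).getD (j + 1) false
            = sizes.any (fun s => decide (s ≤ ((j + 1 : Nat) : Int)) &&
              A.getD (((j + 1 : Nat) : Int) - s).toNat false) from by
          simp [List.getD_eq_getElem?_getD, hjlen]]
        exact hbval
      · have hile : i ≤ j := by omega
        rw [show ∀ b, (A.set (j + 1) b).getD i false = A.getD i false from fun b => by
          simp [List.getD_eq_getElem?_getD, List.getElem?_set_ne (Ne.symm hie)]]
        exact (ihget i hi).1 hile
    · intro hij
      have hie : i ≠ j + 1 := by omega
      rw [show ∀ b, (A.set (j + 1) b).getD i false = A.getD i false from fun b => by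
        simp [List.getD_eq_getElem?_getD, List.getElem?_set_ne (Ne.symm hie)]]
      exact (ihget i hi).2 (by omega)

-- The two helpers agree.
lemma pvInv0 (m : Int) : pvBfsInv m (PySem.Set.ofList [0]) [0] := by
  have h00 : (PySem.Set.ofList [(0 : Int)]) = [0] := by decide
  rw [pvBfsInv, h00]
  refine ⟨List.nodup_singleton _, ?_, fun v hv => hv⟩
  intro v hv
  rw [List.mem_singleton] at hv
  subst hv
  exact ⟨le_refl 0, Or.inl rfl⟩

lemma pvAxis_eq (m : Int) (sizes : List Int) :
    pvAxisPositionsA m sizes = pvAxisPositionsB m sizes := by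
  simp only [pvAxisPositionsA, pvAxisPositionsB]
  have hsfil : ∀ s ∈ sizes.filter (fun s => decide (0 < s)), 0 < s :=
    fun s hsm => of_decide_eq_true (List.mem_filter.mp hsm).2
  by_cases h0 : sizes.filter (fun s => decide (0 < s)) = []
  · simp [h0]
  · rw [dif_neg h0]
    obtain ⟨hF, hFm⟩ := pvBfsLoop_mem m (sizes.filter (fun s => decide (0 < s))) hsfil (pvInv0 m)
    by_cases hm : m < 0
    · rw [if_pos (Or.inr hm)]
      apply PySem.List.sorted_eq_of_perm_of_pairwise_lt
      · apply List.perm_of_nodup_nodup_toFinset_eq (List.nodup_singleton _) hF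
        ext v
        simp only [List.mem_toFinset, List.mem_singleton, hFm]
        constructor
        · rintro rfl
          exact pvReach.zero
        · intro hr
          have h1 := pvReach_nonneg m _ hsfil hr
          have h2 := pvReach_bound m _ hr
          omega
      · simp
    · have hm' : 0 ≤ m := Int.not_lt.mp hm
      rw [if_neg (by rintro (hc | hc); exacts [h0 hc, hm hc])]
      obtain ⟨hlen, hget⟩ := pvDPInv m hm' (sizes.filter (fun s => decide (0 < s))) hsfil m.toNat le_rfl
      apply PySem.List.sorted_eq_of_perm_of_pairwise_lt
      · apply List.perm_of_nodup_nodup_toFinset_eq ?nd hF ?fs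
        case nd =>
          exact List.Nodup.map (fun a b h => Int.ofNat.inj h)
            (List.nodup_range.filter _)
        case fs =>
          ext v
          simp only [List.mem_toFinset, List.mem_map, List.mem_filter, List.mem_range,
            Int.ofNat_eq_natCast, hFm]
          constructor
          · rintro ⟨i, ⟨hi, hgi⟩, rfl⟩
            exact ((hget i (by omega)).1 (by omega)).mp hgi
          · intro hr
            have h1 := pvReach_nonneg m _ hsfil hr
            have h2 := pvReach_bound m _ hr
            refine ⟨v.toNat, ⟨by omega, ?_⟩, by omega⟩
            refine ((hget v.toNat (by omega)).1 (by omega)).mpr ?_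
            rw [show ((v.toNat : Nat) : Int) = v by omega]
            exact hr
      · exact List.Pairwise.map _ (fun a b h => Int.ofNat_lt.mpr h)
          (List.pairwise_lt_range.filter _)

-- ===== VERDICT (by name: the statement is the Claim_ definition above) =====
theorem generate_2d_candidates_with_orientations_py_spec : Claim_equal_generate_2d_candidates_with_orientations_py := by
  intro pl pw ors _
  unfold Spec_generate_2d_candidates_with_orientations_py
  unfold generate_2d_candidates_with_orientations_py generate_2d_candidates_with_orientations_py_alt
  simp only [pvAxis_eq, PySem.List.foldl_append_singleton_eq_map, PySem.List.foldl_append_eq_flatMap]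
  simp
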